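-- pv_equiv track=rewrite | github.com/pavish288/Python_Lab | 10.Functions/6.lst_of_tup.py | compute
-- ===== SOURCE A (Python) =====
-- def compute(num):
--     if num==0:
--         return []
--     def tup(num):
--         def sqr(num,rep=2):
--             if rep==0:
--                 return 1
--             return num*sqr(num,rep-1)
--         def cube(num,rep=3):
--             if rep==0:
--                 return 1
--             return num*cube(num,rep-1)
--         return (num,sqr(num),cube(num))
--     return [tup(num)]+compute(num-1)
-- ===== SOURCE B (Python) =====
-- def compute(num):
--     return [(i, i * i, i * i * i) for i in range(num, 0, -1)]
-- ===== Notes on version B (the rewrite author's own statement) =====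
-- stated objective: simpler
-- what changed: Replaces the outer recursion and the inner recursive sqr/cube helpers with a single list comprehension over range(num, 0, -1) using direct multiplication.
import Mathlib
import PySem

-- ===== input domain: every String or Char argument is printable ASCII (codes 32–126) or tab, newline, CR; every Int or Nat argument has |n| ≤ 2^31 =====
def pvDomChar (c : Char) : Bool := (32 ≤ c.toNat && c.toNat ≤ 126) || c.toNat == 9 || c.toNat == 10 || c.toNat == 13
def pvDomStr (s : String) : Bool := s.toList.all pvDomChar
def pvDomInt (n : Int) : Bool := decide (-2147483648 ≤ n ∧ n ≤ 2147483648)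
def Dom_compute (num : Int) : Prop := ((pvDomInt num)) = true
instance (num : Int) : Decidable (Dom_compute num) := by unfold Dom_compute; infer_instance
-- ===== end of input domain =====

-- B replaces A's recursion (and recursive sqr/cube helpers) by one flat pass over range(num,0,-1): simpler decomposition, same values.


-- ===== PORT A =====
-- inner helper sqr(num, rep=2): recursion on rep (a Nat counter in Python's reachable calls)
def computeSqr (num : Int) (rep : Nat) : Int :=
  match rep with
  | 0 => 1
  | r + 1 => num * computeSqr num r

-- inner helper cube(num, rep=3): same recursion, kept as its own helper as in A
def computeCube (num : Int) (rep : Nat) : Int :=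
  match rep with
  | 0 => 1
  | r + 1 => num * computeCube num r

-- the 'if num < 0' branch is only a totality guard: Python A diverges (RecursionError)
-- there, which Pre_compute excludes.
def compute (num : Int) : List (Int × Int × Int) :=
  if num == 0 then []
  else if num < 0 then []
  else (num, computeSqr num 2, computeCube num 3) :: compute (num - 1)
termination_by num.toNat
decreasing_by simp_all; omega

-- ===== PORT B =====
def compute_alt (num : Int) : List (Int × Int × Int) :=
  (PySem.List.pyRange num 0 (-1)).map (fun i => (i, i * i, i * i * i))

-- ===== PRECONDITION & SPEC =====
-- Pre_ excludes num < 0, on which Python A recurses without bound (RecursionError).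
def Pre_compute (num : Int) : Prop := 0 ≤ num
instance (num : Int) : Decidable (Pre_compute num) := by unfold Pre_compute; infer_instance

def pvWitness_compute : Int := (3)

def Spec_compute (num : Int) (out : List (Int × Int × Int)) : Prop := out = compute_alt num
instance (num : Int) (out : List (Int × Int × Int)) : Decidable (Spec_compute num out) := by unfold Spec_compute; infer_instance

-- ===== CLAIM (what is proved, stated in full; the proofs are below) =====
def Claim_equal_compute : Prop := ∀ (num : Int), Dom_compute num → Pre_compute num → Spec_compute num (compute num)

-- ===== LEMMAS AND PROOFS =====
theorem compute_eq_alt_nat (n : Nat) : compute (n : Int) = compute_alt (n : Int) := by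
  induction n with
  | zero =>
      rw [compute.eq_def]
      simp [compute_alt, PySem.List.pyRange_neg_one_eq_nil (le_refl (0 : Int))]
  | succ k ih =>
      rw [compute.eq_def]
      have h0 : ((k : Int) + 1) ≠ 0 := by positivity
      have hlt : (0 : Int) < (k : Int) + 1 := by positivity
      simp only [push_cast, Nat.cast_succ] at *
      rw [if_neg (by simpa using h0), if_neg (by omega)]
      unfold compute_alt
      rw [PySem.List.pyRange_neg_one_cons hlt]
      simp only [List.map_cons]
      have hk : ((k : Int) + 1 - 1) = (k : Int) := by ring
      rw [hk, ih]
      unfold compute_alt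
      simp only [computeSqr, computeCube, mul_one, mul_assoc]

-- ===== VERDICT (by name: the statement is the Claim_ definition above) =====
theorem compute_spec : Claim_equal_compute := by
  intro num _ hpre
  unfold Spec_compute
  unfold Pre_compute at hpre
  have : num = (num.toNat : Int) := by omega
  rw [this]
  exact compute_eq_alt_nat num.toNat
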